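-- pv_equiv track=rewrite | github.com/paman7647/Ultroid | Downloads/Chat/qweb/services/ai-python/app/search_service.py | _create_snippet
-- ===== SOURCE A (Python) =====
-- def _create_snippet(content: str, tokens: list[str], context_chars: int = 80) -> str:
--     lower = content.lower()
--     best_pos = len(content)
--     for token in tokens:
--         pos = lower.find(token)
--         if pos != -1 and pos < best_pos:
--             best_pos = pos
--
--     start = max(0, best_pos - context_chars // 2)
--     end = min(len(content), best_pos + context_chars)
--     snippet = content[start:end]
--     if start > 0:
--         snippet = "..." + snippet
--     if end < len(content):
--         snippet = snippet + "..."
--     return snippet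
-- ===== SOURCE B (Python) =====
-- def _create_snippet(content: str, tokens: list[str], context_chars: int = 80) -> str:
--     lower = content.lower()
--     n = len(content)
--     best = n
--     for i in range(n):
--         if any(lower.startswith(t, i) for t in tokens):
--             best = i
--             break
--     start = max(0, best - context_chars // 2)
--     end = min(n, best + context_chars)
--     return ("..." if start > 0 else "") + content[start:end] + ("..." if end < n else "")
-- ===== Notes on version B (the rewrite author's own statement) =====
-- stated objective: alternative
-- what changed: A runs str.find over the whole lowered content for every token and keeps a running minimum, then conditionally reassigns the snippet twice; B makes a single left-to-right scan of the content that stops at the first position where any token matches via startswith, and builds the result in one concatenation of an optional prefix, the slice, and an optional suffix.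
import Mathlib
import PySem

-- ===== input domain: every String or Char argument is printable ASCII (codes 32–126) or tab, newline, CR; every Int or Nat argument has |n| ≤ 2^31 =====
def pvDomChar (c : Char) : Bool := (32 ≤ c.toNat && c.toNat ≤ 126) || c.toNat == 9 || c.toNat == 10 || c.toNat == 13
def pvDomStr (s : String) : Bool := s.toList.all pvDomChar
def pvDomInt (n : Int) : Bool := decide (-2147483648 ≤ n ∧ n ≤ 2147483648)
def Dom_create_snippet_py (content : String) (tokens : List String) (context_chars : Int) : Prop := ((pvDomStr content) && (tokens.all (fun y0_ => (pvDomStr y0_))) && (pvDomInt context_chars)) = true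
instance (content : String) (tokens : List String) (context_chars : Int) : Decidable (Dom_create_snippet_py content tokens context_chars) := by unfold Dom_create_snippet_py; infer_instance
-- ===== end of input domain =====

-- B replaces A's per-token full-string find + running minimum by a single left-to-right scan
-- stopping at the first position where any token matches, and builds the result in one
-- concatenation instead of two conditional reassignments (objective: alternative).

-- ===== PORT A =====
def create_snippet_py (content : String) (tokens : List String) (context_chars : Int) : String :=
  let lower := PySem.Str.lower content
  let best_pos : Int := tokens.foldl
    (fun best token =>
      let pos := PySem.Str.find lower token
      if pos ≠ -1 ∧ pos < best then pos else best)
    ((PySem.Str.len content : Int))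
  let start := max 0 (best_pos - PySem.Int.floordiv context_chars 2)
  let stop := min ((PySem.Str.len content : Int)) (best_pos + context_chars)
  let snippet := PySem.Str.slice content (some start) (some stop)
  let snippet := if start > 0 then "..." ++ snippet else snippet
  let snippet := if stop < ((PySem.Str.len content : Int)) then snippet ++ "..." else snippet
  snippet

-- ===== PORT B =====
-- the loop 'for i in range(n): if any(lower.startswith(t, i) …): best = i; break'
-- as structural recursion over the suffixes of the lowered character list
def pvFirstHit (tokens : List String) : List Char → Nat
  | [] => 0
  | c :: rest =>
    if tokens.any (fun t => PySem.Chars.startswith (c :: rest) t.toList) then 0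
    else pvFirstHit tokens rest + 1

def create_snippet_py_alt (content : String) (tokens : List String) (context_chars : Int) : String :=
  let n : Int := (content.toList.length : Int)
  let best : Int := (pvFirstHit tokens (PySem.Chars.lower content.toList) : Int)
  let start := max 0 (best - PySem.Int.floordiv context_chars 2)
  let stop := min n (best + context_chars)
  (if 0 < start then "..." else "")
    ++ PySem.Str.slice content (some start) (some stop)
    ++ (if stop < n then "..." else "")

-- ===== PRECONDITION & SPEC =====
def Spec_create_snippet_py (content : String) (tokens : List String) (context_chars : Int) (out : String) : Prop := out = create_snippet_py_alt content tokens context_chars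
instance (content : String) (tokens : List String) (context_chars : Int) (out : String) : Decidable (Spec_create_snippet_py content tokens context_chars out) := by unfold Spec_create_snippet_py; infer_instance

-- ===== CLAIM (what is proved, stated in full; the proofs are below) =====
def Claim_equal_create_snippet_py : Prop := ∀ (content : String) (tokens : List String) (context_chars : Int), Dom_create_snippet_py content tokens context_chars → Spec_create_snippet_py content tokens context_chars (create_snippet_py content tokens context_chars)

-- ===== LEMMAS AND PROOFS =====

def pvFold (tokens : List String) (L : List Char) (b : Int) : Int :=
  tokens.foldl
    (fun best token =>
      let pos := PySem.Chars.find L token.toList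
      if pos ≠ -1 ∧ pos < best then pos else best) b

theorem pvFold_le (tokens : List String) (L : List Char) (b : Int) : pvFold tokens L b ≤ b := by
  induction tokens generalizing b with
  | nil => simp [pvFold]
  | cons t ts ih =>
    simp only [pvFold, List.foldl] at *
    split_ifs with h
    · exact le_trans (ih _) (le_of_lt h.2)
    · exact ih _

theorem pvFold_le_find (tokens : List String) (L : List Char) (b : Int)
    (t : String) (ht : t ∈ tokens) (hf : PySem.Chars.find L t.toList ≠ -1) :
    pvFold tokens L b ≤ PySem.Chars.find L t.toList := by
  induction tokens generalizing b with
  | nil => cases ht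
  | cons u us ih =>
    rcases List.mem_cons.mp ht with rfl | ht'
    · simp only [pvFold, List.foldl]
      split_ifs with h
      · exact pvFold_le _ _ _
      · rw [not_and_or, not_lt] at h
        rcases h with h | h
        · exact absurd hf (by simpa using h)
        · exact le_trans (pvFold_le _ _ _) h
    · exact ih _ ht'

theorem pvFold_cases (tokens : List String) (L : List Char) (b : Int) :
    pvFold tokens L b = b ∨
      ∃ t ∈ tokens, PySem.Chars.find L t.toList ≠ -1 ∧ pvFold tokens L b = PySem.Chars.find L t.toList := by
  induction tokens generalizing b with
  | nil => left; simp [pvFold]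
  | cons u us ih =>
    simp only [pvFold, List.foldl]
    split_ifs with h
    · rcases ih (PySem.Chars.find L u.toList) with h' | ⟨t, htm, hf, h'⟩
      · right; exact ⟨u, List.mem_cons_self, h.1, h'⟩
      · right; exact ⟨t, List.mem_cons_of_mem _ htm, hf, h'⟩
    · rcases ih b with h' | ⟨t, htm, hf, h'⟩
      · left; exact h'
      · right; exact ⟨t, List.mem_cons_of_mem _ htm, hf, h'⟩

theorem pvFirstHit_le_length (tokens : List String) (L : List Char) :
    pvFirstHit tokens L ≤ L.length := by
  induction L with
  | nil => simp [pvFirstHit]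
  | cons c rest ih =>
    simp only [pvFirstHit, List.length_cons]
    split_ifs <;> omega

theorem pvFirstHit_le_of_hit (tokens : List String) (L : List Char) (t : String)
    (ht : t ∈ tokens) (j : Nat) (hp : t.toList <+: L.drop j) :
    pvFirstHit tokens L ≤ j := by
  induction L generalizing j with
  | nil => simp [pvFirstHit]
  | cons c rest ih =>
    simp only [pvFirstHit]
    split_ifs with h
    · omega
    · cases j with
      | zero =>
        exfalso
        apply h
        simp only [List.any_eq_true]
        exact ⟨t, ht, (PySem.Chars.startswith_iff _ _).2 (by simpa using hp)⟩
      | succ j' =>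
        have := ih j' (by simpa using hp)
        omega

theorem pvFirstHit_hit_or (tokens : List String) (L : List Char) :
    pvFirstHit tokens L = L.length ∨
      ∃ t ∈ tokens, t.toList <+: L.drop (pvFirstHit tokens L) := by
  induction L with
  | nil => left; simp [pvFirstHit]
  | cons c rest ih =>
    simp only [pvFirstHit]
    split_ifs with h
    · right
      simp only [List.any_eq_true] at h
      obtain ⟨t, ht, hs⟩ := h
      exact ⟨t, ht, by simpa using (PySem.Chars.startswith_iff _ _).1 hs⟩
    · rcases ih with h' | ⟨t, ht, hp⟩
      · left; simp [h']
      · right; exact ⟨t, ht, by simpa using hp⟩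

theorem pvBest_eq (tokens : List String) (L : List Char) :
    pvFold tokens L (L.length : Int) = (pvFirstHit tokens L : Nat) := by
  apply le_antisymm
  · rcases pvFirstHit_hit_or tokens L with h | ⟨t, ht, hp⟩
    · rw [h]; exact_mod_cast pvFold_le tokens L _
    · have hinfix : t.toList <:+: L := hp.isInfix.trans (List.drop_suffix _ _).isInfix
      have hf : PySem.Chars.find L t.toList ≠ -1 :=
        (PySem.Chars.find_ne_neg_one_iff _ _).2 hinfix
      have h0 : (0:Int) ≤ PySem.Chars.find L t.toList := by
        have := PySem.Chars.neg_one_le_find L t.toList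
        omega
      have hspec := PySem.Chars.find_spec (s := L) (sub := t.toList) h0
      have hle : (PySem.Chars.find L t.toList).toNat ≤ pvFirstHit tokens L := by
        by_contra hlt
        exact hspec.2 _ (by omega) hp
      calc pvFold tokens L (L.length : Int) ≤ PySem.Chars.find L t.toList :=
              pvFold_le_find tokens L _ t ht hf
        _ ≤ (pvFirstHit tokens L : Int) := by omega
  · rcases pvFold_cases tokens L (L.length : Int) with h | ⟨t, ht, hf, h⟩
    · rw [h]; exact_mod_cast pvFirstHit_le_length tokens L
    · have h0 : (0:Int) ≤ PySem.Chars.find L t.toList := by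
        have := PySem.Chars.neg_one_le_find L t.toList
        omega
      have hspec := PySem.Chars.find_spec (s := L) (sub := t.toList) h0
      have := pvFirstHit_le_of_hit tokens L t ht _ hspec.1
      rw [h]
      omega

theorem pvLen_lower (s : List Char) : (PySem.Chars.lower s).length = s.length := by
  simp [PySem.Chars.lower]

-- ===== VERDICT (by name: the statement is the Claim_ definition above) =====
theorem create_snippet_py_spec : Claim_equal_create_snippet_py := by
  intro content tokens context_chars _
  show create_snippet_py content tokens context_chars = create_snippet_py_alt content tokens context_chars
  simp only [create_snippet_py, create_snippet_py_alt, PySem.Str.find_eq, PySem.Str.len_eq,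
    PySem.Str.toList_lower]
  have hb := pvBest_eq tokens (PySem.Chars.lower content.toList)
  rw [pvLen_lower] at hb
  simp only [pvFold] at hb
  rw [hb]
  split_ifs with h1 h2 h2 <;> simp_all [String.append_assoc]
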